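-- pv_equiv track=rewrite | github.com/jloutey-hash/geovac | debug/alpha_sa_hopf_action.py | build_fock_graph
-- ===== SOURCE A (Python) =====
-- def build_fock_graph(m_max, edge_rule='dipole'):
--     """Build the S³ Fock graph at cutoff m_max.
--
--     Nodes: (n, l, m_l) with n=1..m_max, l=0..n-1, m_l=-l..l
--
--     Edge rules:
--     - 'fock_raise': Δn=+1, Δl=+1, |Δm|≤1 (Fock raising only)
--     - 'dipole': Δn=±1, Δl=±1, |Δm|≤1 (full dipole transitions)
--     - 'fock_raise_m0': Δn=+1, Δl=+1, Δm=0 (m-preserving Fock)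
--     """
--     nodes = []
--     node_index = {}
--     for n in range(1, m_max + 1):
--         for l in range(n):
--             for ml in range(-l, l + 1):
--                 idx = len(nodes)
--                 nodes.append((n, l, ml))
--                 node_index[(n, l, ml)] = idx
--
--     V = len(nodes)
--     edges = []
--
--     for i, (n1, l1, m1) in enumerate(nodes):
--         for j, (n2, l2, m2) in enumerate(nodes):
--             if j <= i:
--                 continue
--             dn = n2 - n1
--             dl = l2 - l1
--             dm = m2 - m1
--
--             if edge_rule == 'fock_raise':
--                 if dn == 1 and dl == 1 and abs(dm) <= 1:
--                     edges.append((i, j))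
--             elif edge_rule == 'dipole':
--                 if abs(dn) == 1 and abs(dl) == 1 and abs(dm) <= 1:
--                     edges.append((i, j))
--             elif edge_rule == 'fock_raise_m0':
--                 if dn == 1 and dl == 1 and dm == 0:
--                     edges.append((i, j))
--
--     return nodes, edges, V
-- ===== SOURCE B (Python) =====
-- def build_fock_graph(m_max, edge_rule='dipole'):
--     """Same graph as A, but edges are found in O(V): for each node, look up
--     the few lexicographically-larger candidate neighbours in node_index."""
--     nodes = [(n, l, ml)
--              for n in range(1, m_max + 1)
--              for l in range(n)
--              for ml in range(-l, l + 1)]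
--     node_index = {t: i for i, t in enumerate(nodes)}
--     if edge_rule == 'fock_raise':
--         deltas = [(1, 1, -1), (1, 1, 0), (1, 1, 1)]
--     elif edge_rule == 'dipole':
--         deltas = [(1, -1, -1), (1, -1, 0), (1, -1, 1),
--                   (1, 1, -1), (1, 1, 0), (1, 1, 1)]
--     elif edge_rule == 'fock_raise_m0':
--         deltas = [(1, 1, 0)]
--     else:
--         deltas = []
--     edges = []
--     for i, (n, l, m) in enumerate(nodes):
--         for dn, dl, dm in deltas:
--             j = node_index.get((n + dn, l + dl, m + dm))
--             if j is not None:
--                 edges.append((i, j))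
--     return nodes, edges, len(nodes)
-- ===== Notes on version B (the rewrite author's own statement) =====
-- stated objective: faster
-- what changed: Edges are found by looking up each node's few lexicographically-larger candidate neighbours (n+1, l+-1, m+dm) in a node->index dict, instead of testing all O(V^2) node pairs; the candidate order reproduces A's (i, increasing j) edge order. Intended as asymptotically faster (O(V) vs O(V^2)); a timing run measured B several hundred times faster at the largest size where both versions finished, but marked the speed-up unconfirmed because A times out on larger inputs.
import Mathlib
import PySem

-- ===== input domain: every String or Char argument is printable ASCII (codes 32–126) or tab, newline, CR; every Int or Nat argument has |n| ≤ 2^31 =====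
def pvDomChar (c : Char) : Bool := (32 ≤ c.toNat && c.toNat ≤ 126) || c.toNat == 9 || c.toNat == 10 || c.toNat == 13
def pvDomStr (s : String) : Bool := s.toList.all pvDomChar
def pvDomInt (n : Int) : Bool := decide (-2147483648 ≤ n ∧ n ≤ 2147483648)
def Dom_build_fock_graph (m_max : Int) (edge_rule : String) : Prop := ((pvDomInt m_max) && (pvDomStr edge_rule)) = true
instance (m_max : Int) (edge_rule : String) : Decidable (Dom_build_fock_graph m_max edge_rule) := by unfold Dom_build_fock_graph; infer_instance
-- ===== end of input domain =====

-- B replaces A's all-pairs edge scan by a per-node lookup of the few lexicographically-larger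
-- candidate neighbours in a node->index dict (same return value; intended as faster — the timing
-- run measured B several hundred times faster at the largest size where both versions finished,
-- and marked the speed-up unconfirmed because A times out on larger inputs).

-- ===== PORT A =====
-- the triple node-building loop (Python A also fills node_index here; A never reads it,
-- so it is omitted from this port — it has no effect on the returned value)
def fockNodesA (m_max : Int) : List (Int × Int × Int) :=
  (PySem.List.pyRange 1 (m_max + 1) 1).foldl (fun acc n =>
    (PySem.List.pyRange 0 n 1).foldl (fun acc l =>
      (PySem.List.pyRange (-l) (l + 1) 1).foldl (fun acc ml =>
        acc ++ [(n, l, ml)]) acc) acc) []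

def build_fock_graph (m_max : Int) (edge_rule : String) : (List (Int × Int × Int)) × (List (Int × Int)) × Int :=
  let nodes := fockNodesA m_max
  let V : Int := PySem.List.len nodes
  let edges : List (Int × Int) :=
    (PySem.List.enumerate nodes 0).foldl (fun acc p =>
      (PySem.List.enumerate nodes 0).foldl (fun acc q =>
        if q.1 ≤ p.1 then acc
        else
          let dn := q.2.1 - p.2.1
          let dl := q.2.2.1 - p.2.2.1
          let dm := q.2.2.2 - p.2.2.2
          if edge_rule == "fock_raise" then
            if dn = 1 ∧ dl = 1 ∧ dm.natAbs ≤ 1 then acc ++ [(p.1, q.1)] else acc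
          else if edge_rule == "dipole" then
            if dn.natAbs = 1 ∧ dl.natAbs = 1 ∧ dm.natAbs ≤ 1 then acc ++ [(p.1, q.1)] else acc
          else if edge_rule == "fock_raise_m0" then
            if dn = 1 ∧ dl = 1 ∧ dm = 0 then acc ++ [(p.1, q.1)] else acc
          else acc) acc) []
  (nodes, edges, V)

-- ===== PORT B =====
-- nodes as a comprehension
def fockNodesB (m_max : Int) : List (Int × Int × Int) :=
  (PySem.List.pyRange 1 (m_max + 1) 1).flatMap (fun n =>
    (PySem.List.pyRange 0 n 1).flatMap (fun l =>
      (PySem.List.pyRange (-l) (l + 1) 1).map (fun ml => (n, l, ml))))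

-- node_index = {t: i for i, t in enumerate(nodes)}
def fockIndexB (nodes : List (Int × Int × Int)) : PySem.Dict (Int × Int × Int) Int :=
  (PySem.List.enumerate nodes 0).foldl (fun d p => d.insert p.2 p.1) PySem.Dict.empty

-- the rule-dependent candidate deltas (dn, dl, dm), in increasing lexicographic order
def fockDeltas (edge_rule : String) : List (Int × Int × Int) :=
  if edge_rule == "fock_raise" then [(1, 1, -1), (1, 1, 0), (1, 1, 1)]
  else if edge_rule == "dipole" then
    [(1, -1, -1), (1, -1, 0), (1, -1, 1), (1, 1, -1), (1, 1, 0), (1, 1, 1)]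
  else if edge_rule == "fock_raise_m0" then [(1, 1, 0)]
  else []

def build_fock_graph_alt (m_max : Int) (edge_rule : String) : (List (Int × Int × Int)) × (List (Int × Int)) × Int :=
  let nodes := fockNodesB m_max
  let node_index := fockIndexB nodes
  let deltas := fockDeltas edge_rule
  let edges : List (Int × Int) :=
    (PySem.List.enumerate nodes 0).foldl (fun acc p =>
      deltas.foldl (fun acc d =>
        match node_index.get? (p.2.1 + d.1, p.2.2.1 + d.2.1, p.2.2.2 + d.2.2) with
        | some j => acc ++ [(p.1, j)]
        | none => acc) acc) []
  (nodes, edges, PySem.List.len nodes)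

-- ===== PRECONDITION & SPEC =====
def Spec_build_fock_graph (m_max : Int) (edge_rule : String) (out : (List (Int × Int × Int)) × (List (Int × Int)) × Int) : Prop := out = build_fock_graph_alt m_max edge_rule
instance (m_max : Int) (edge_rule : String) (out : (List (Int × Int × Int)) × (List (Int × Int)) × Int) : Decidable (Spec_build_fock_graph m_max edge_rule out) := by unfold Spec_build_fock_graph; infer_instance

-- ===== CLAIM (what is proved, stated in full; the proofs are below) =====
def Claim_equal_build_fock_graph : Prop := ∀ (m_max : Int) (edge_rule : String), Dom_build_fock_graph m_max edge_rule → Spec_build_fock_graph m_max edge_rule (build_fock_graph m_max edge_rule)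

-- ===== LEMMAS AND PROOFS =====

-- strict lexicographic order on (n, l, m) triples; the node list is sorted by it
def fockLt (a b : Int × Int × Int) : Prop :=
  a.1 < b.1 ∨ (a.1 = b.1 ∧ (a.2.1 < b.2.1 ∨ (a.2.1 = b.2.1 ∧ a.2.2 < b.2.2)))

-- candidate (n, l, m) obtained by applying a delta to a node
def fockShift (v d : Int × Int × Int) : Int × Int × Int :=
  (v.1 + d.1, v.2.1 + d.2.1, v.2.2 + d.2.2)

theorem fockNodes_eq (m_max : Int) : fockNodesA m_max = fockNodesB m_max := by
  unfold fockNodesA fockNodesB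
  simp only [PySem.List.foldl_append_singleton_eq_map, PySem.List.foldl_append_eq_flatMap]
  simp

theorem fockNodesB_pairwise (m_max : Int) : (fockNodesB m_max).Pairwise fockLt := by
  unfold fockNodesB
  rw [List.pairwise_flatMap]
  constructor
  · intro n _
    rw [List.pairwise_flatMap]
    constructor
    · intro l _
      rw [List.pairwise_map]
      exact (PySem.List.pairwise_lt_pyRange_one _ _).imp (fun h => by
        simp [fockLt]; omega)
    · refine (PySem.List.pairwise_lt_pyRange_one _ _).imp ?_
      intro l l' hll x hx y hy
      simp only [List.mem_map] at hx hy
      obtain ⟨a, _, rfl⟩ := hx; obtain ⟨b, _, rfl⟩ := hy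
      simp [fockLt]; omega
  · refine (PySem.List.pairwise_lt_pyRange_one _ _).imp ?_
    intro n n' hnn x hx y hy
    simp only [List.mem_flatMap, List.mem_map] at hx hy
    obtain ⟨l, _, a, _, rfl⟩ := hx; obtain ⟨l', _, b, _, rfl⟩ := hy
    simp [fockLt]; omega

theorem fockLt_asymm (a b : Int × Int × Int) (h1 : fockLt a b) (h2 : fockLt b a) : False := by
  obtain ⟨a1, a2, a3⟩ := a; obtain ⟨b1, b2, b3⟩ := b; simp [fockLt] at h1 h2; omega

theorem fockLt_ne (a b : Int × Int × Int) (h : fockLt a b) : a ≠ b := by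
  rintro rfl; exact fockLt_asymm a a h h

theorem fockLt_nodup (xs : List (Int × Int × Int)) (hx : xs.Pairwise fockLt) : xs.Nodup :=
  hx.imp (fun h => fockLt_ne _ _ h)

theorem fockLt_pos_iff (xs : List (Int × Int × Int)) (hx : xs.Pairwise fockLt)
    (k k' : Nat) (hk : k < xs.length) (hk' : k' < xs.length) :
    k < k' ↔ fockLt xs[k] xs[k'] := by
  constructor
  · intro h; exact List.pairwise_iff_getElem.mp hx k k' hk hk' h
  · intro h
    by_contra hc
    rcases Nat.lt_or_ge k' k with h' | h'
    · exact fockLt_asymm _ _ h (List.pairwise_iff_getElem.mp hx k' k hk' hk h')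
    · have : k = k' := by omega
      subst this
      exact fockLt_asymm _ _ h h

theorem fold_insert_get (ps : List (Int × (Int × Int × Int)))
    (d0 : PySem.Dict (Int × Int × Int) Int)
    (hnd : (ps.map (·.2)).Nodup) (c : Int × Int × Int) :
    (ps.foldl (fun d p => d.insert p.2 p.1) d0).get? c =
      match ps.find? (fun p => p.2 == c) with
      | some p => some p.1
      | none => d0.get? c := by
  induction ps generalizing d0 with
  | nil => simp
  | cons p rest ih =>
    simp only [List.map_cons, List.nodup_cons, List.mem_map] at hnd
    obtain ⟨hp, hrest⟩ := hnd
    simp only [List.foldl_cons, List.find?_cons]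
    rw [ih _ hrest]
    by_cases hpc : p.2 = c
    · subst hpc
      have hnone : rest.find? (fun q => q.2 == p.2) = none := by
        rw [List.find?_eq_none]
        intro x hxmem
        simp only [beq_iff_eq]
        intro hx
        exact hp ⟨x, hxmem, hx⟩
      simp [hnone, PySem.Dict.get?_insert_self]
    · have : (p.2 == c) = false := by simp [hpc]
      simp only [this]
      cases hfind : rest.find? (fun q => q.2 == c) with
      | some q => simp
      | none => simp [PySem.Dict.get?_insert_of_ne _ _ (Ne.symm hpc)]

theorem fockIndexB_get (xs : List (Int × Int × Int)) (hx : xs.Pairwise fockLt)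
    (c : Int × Int × Int) (j : Int) :
    (fockIndexB xs).get? c = some j ↔ ∃ k : Nat, j = (k : Int) ∧ xs[k]? = some c := by
  unfold fockIndexB
  rw [fold_insert_get _ _ (by rw [PySem.List.map_snd_enumerate]; exact fockLt_nodup xs hx)]
  cases hfind : (PySem.List.enumerate xs 0).find? (fun p => p.2 == c) with
  | none =>
    simp only [PySem.Dict.get?_empty]
    rw [List.find?_eq_none] at hfind
    constructor
    · intro h; cases h
    · rintro ⟨k, rfl, hk⟩
      have hlt : k < xs.length := by
        by_contra hge
        simp [List.getElem?_eq_none (by omega : xs.length ≤ k)] at hk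
      exfalso
      refine hfind (0 + (k : Int), xs[k]) ?_ ?_
      · exact (PySem.List.mem_enumerate_iff xs 0 _).mpr ⟨k, hlt, rfl⟩
      · simp
        exact (List.getElem?_eq_some_iff.mp hk).2.symm ▸ rfl
  | some q =>
    have hq2 : q.2 = c := by simpa using List.find?_some hfind
    have hqmem := List.mem_of_find?_eq_some hfind
    rw [PySem.List.mem_enumerate_iff] at hqmem
    obtain ⟨k, hlt, hqe⟩ := hqmem
    constructor
    · rintro h
      have hj : j = q.1 := by cases h; rfl
      refine ⟨k, ?_, ?_⟩
      · rw [hj, hqe]; simp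
      · rw [List.getElem?_eq_some_iff]
        refine ⟨hlt, ?_⟩
        rw [← hq2, hqe]
    · rintro ⟨k', rfl, hk'⟩
      have hlt' : k' < xs.length := (List.getElem?_eq_some_iff.mp hk').1
      have hxk' : xs[k'] = c := (List.getElem?_eq_some_iff.mp hk').2
      have hxk : xs[k] = c := by rw [← hq2, hqe]
      have hkk : k' = k := by
        have := (fockLt_nodup xs hx).getElem_inj_iff (hi := hlt') (hj := hlt)
        exact this.mp (by rw [hxk', hxk])
      subst hkk
      rw [hqe]
      simp

theorem filter_enum_eq_filterMap (xs : List (Int × Int × Int)) (hx : xs.Pairwise fockLt)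
    (cs : List (Int × Int × Int)) (hc : cs.Pairwise fockLt) :
    (PySem.List.enumerate xs 0).filter (fun q => decide (q.2 ∈ cs)) =
      cs.filterMap (fun c => ((fockIndexB xs).get? c).map (fun j => (j, c))) := by
  have hLA_pw : ((PySem.List.enumerate xs 0).filter (fun q => decide (q.2 ∈ cs))).Pairwise
      (fun a b : Int × (Int × Int × Int) => a.1 < b.1) :=
    (PySem.List.pairwise_lt_enumerate xs 0).filter _
  have hLB_pw : (cs.filterMap (fun c => ((fockIndexB xs).get? c).map (fun j => (j, c)))).Pairwise
      (fun a b : Int × (Int × Int × Int) => a.1 < b.1) := by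
    rw [List.pairwise_filterMap]
    refine hc.imp ?_
    intro a b hab x hxa y hyb
    rw [Option.map_eq_some_iff] at hxa hyb
    obtain ⟨ja, hja, rfl⟩ := hxa
    obtain ⟨jb, hjb, rfl⟩ := hyb
    rw [fockIndexB_get xs hx] at hja hjb
    obtain ⟨ka, rfl, hka⟩ := hja
    obtain ⟨kb, rfl, hkb⟩ := hjb
    have hla : ka < xs.length := (List.getElem?_eq_some_iff.mp hka).1
    have hlb : kb < xs.length := (List.getElem?_eq_some_iff.mp hkb).1
    have : ka < kb := by
      rw [fockLt_pos_iff xs hx ka kb hla hlb,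
        (List.getElem?_eq_some_iff.mp hka).2, (List.getElem?_eq_some_iff.mp hkb).2]
      exact hab
    simp only []
    exact_mod_cast this
  have hmem : ∀ q, q ∈ (PySem.List.enumerate xs 0).filter (fun q => decide (q.2 ∈ cs)) ↔
      q ∈ cs.filterMap (fun c => ((fockIndexB xs).get? c).map (fun j => (j, c))) := by
    intro q
    rw [List.mem_filter, List.mem_filterMap, PySem.List.mem_enumerate_iff]
    constructor
    · rintro ⟨⟨k, hk, rfl⟩, hqc⟩
      simp only [decide_eq_true_eq] at hqc
      refine ⟨xs[k], hqc, ?_⟩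
      rw [Option.map_eq_some_iff]
      refine ⟨0 + (k : Int), ?_, rfl⟩
      rw [fockIndexB_get xs hx]
      exact ⟨k, by simp, by simp⟩
    · rintro ⟨c, hcmem, hq⟩
      rw [Option.map_eq_some_iff] at hq
      obtain ⟨j, hj, rfl⟩ := hq
      rw [fockIndexB_get xs hx] at hj
      obtain ⟨k, rfl, hk⟩ := hj
      have hlt : k < xs.length := (List.getElem?_eq_some_iff.mp hk).1
      have hxc : xs[k] = c := (List.getElem?_eq_some_iff.mp hk).2
      exact ⟨⟨k, hlt, by simp [hxc]⟩, by simpa using hcmem⟩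
  have hperm := (List.perm_ext_iff_of_nodup
      (hLA_pw.imp (fun h => by intro e; subst e; exact lt_irrefl _ h))
      (hLB_pw.imp (fun h => by intro e; subst e; exact lt_irrefl _ h))).mpr hmem
  calc (PySem.List.enumerate xs 0).filter (fun q => decide (q.2 ∈ cs))
      = PySem.List.sorted ((PySem.List.enumerate xs 0).filter (fun q => decide (q.2 ∈ cs)))
          (fun q => q.1) := by
        rw [PySem.List.sorted_eq_of_perm_of_pairwise_lt _ _ _ (List.Perm.refl _) hLA_pw]
    _ = cs.filterMap (fun c => ((fockIndexB xs).get? c).map (fun j => (j, c))) := by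
        rw [PySem.List.sorted_eq_of_perm_of_pairwise_lt _ _ _ hperm.symm hLB_pw]

theorem foldl_append_match {α β : Type} (l : List α) (f : α → Option β) (acc : List β) :
    l.foldl (fun acc x => match f x with | some y => acc ++ [y] | none => acc) acc
      = acc ++ l.filterMap f := by
  induction l generalizing acc with
  | nil => simp
  | cons x t ih =>
    simp only [List.foldl_cons, List.filterMap_cons]
    cases hfx : f x with
    | none => rw [ih]
    | some y => rw [ih]; simp

theorem enum_lt_iff (xs : List (Int × Int × Int)) (hx : xs.Pairwise fockLt)
    (p q : Int × (Int × Int × Int))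
    (hp : p ∈ PySem.List.enumerate xs 0) (hq : q ∈ PySem.List.enumerate xs 0) :
    p.1 < q.1 ↔ fockLt p.2 q.2 := by
  rw [PySem.List.mem_enumerate_iff] at hp hq
  obtain ⟨k, hk, rfl⟩ := hp
  obtain ⟨k', hk', rfl⟩ := hq
  simp only [zero_add]
  rw [show ((k : Int) < (k' : Int)) ↔ k < k' by exact_mod_cast Iff.rfl]
  exact fockLt_pos_iff xs hx k k' hk hk'

theorem edges_eq_generic (xs : List (Int × Int × Int)) (hx : xs.Pairwise fockLt)
    (ds : List (Int × Int × Int))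
    (C : (Int × Int × Int) → (Int × Int × Int) → Prop) [inst : ∀ v w, Decidable (C v w)]
    (hC : ∀ v w, (fockLt v w ∧ C v w) ↔ w ∈ ds.map (fockShift v))
    (hd : ∀ v : Int × Int × Int, (ds.map (fockShift v)).Pairwise fockLt) :
    (PySem.List.enumerate xs 0).foldl (fun acc p =>
      (PySem.List.enumerate xs 0).foldl (fun acc q =>
        if q.1 ≤ p.1 then acc
        else if C p.2 q.2 then acc ++ [(p.1, q.1)] else acc) acc) []
    = (PySem.List.enumerate xs 0).foldl (fun acc p =>
        ds.foldl (fun acc d =>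
          match (fockIndexB xs).get? (p.2.1 + d.1, p.2.2.1 + d.2.1, p.2.2.2 + d.2.2) with
          | some j => acc ++ [(p.1, j)]
          | none => acc) acc) [] := by
  have hstepA : ∀ (p : Int × (Int × Int × Int)) (acc : List (Int × Int)) (q : Int × (Int × Int × Int)),
      (if q.1 ≤ p.1 then acc else if C p.2 q.2 then acc ++ [(p.1, q.1)] else acc)
        = if p.1 < q.1 ∧ C p.2 q.2 then acc ++ [(p.1, q.1)] else acc := by
    intro p acc q
    by_cases h1 : q.1 ≤ p.1
    · have h2 : ¬(p.1 < q.1 ∧ C p.2 q.2) := fun h => absurd h.1 (by omega)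
      simp [h1, h2]
    · have h1' : p.1 < q.1 := by omega
      by_cases h2 : C p.2 q.2
      · simp [h1, h1', h2]
      · simp [h1, h2]
  have hA : (fun (acc : List (Int × Int)) (p : Int × (Int × Int × Int)) =>
      (PySem.List.enumerate xs 0).foldl (fun acc q =>
        if q.1 ≤ p.1 then acc
        else if C p.2 q.2 then acc ++ [(p.1, q.1)] else acc) acc)
      = fun acc p => acc ++
        ((PySem.List.enumerate xs 0).filter (fun q => decide (p.1 < q.1 ∧ C p.2 q.2))).map
          (fun q => (p.1, q.1)) := by
    funext acc p
    calc (PySem.List.enumerate xs 0).foldl (fun acc q =>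
          if q.1 ≤ p.1 then acc
          else if C p.2 q.2 then acc ++ [(p.1, q.1)] else acc) acc
        = (PySem.List.enumerate xs 0).foldl (fun acc q =>
            if p.1 < q.1 ∧ C p.2 q.2 then acc ++ [(p.1, q.1)] else acc) acc := by
          exact PySem.List.foldl_congr_mem _ _ _ _ (fun acc q _ => hstepA p acc q)
      _ = _ := PySem.List.foldl_append_ite _ _ _ _
  have hB : (fun (acc : List (Int × Int)) (p : Int × (Int × Int × Int)) =>
      ds.foldl (fun acc d =>
        match (fockIndexB xs).get? (p.2.1 + d.1, p.2.2.1 + d.2.1, p.2.2.2 + d.2.2) with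
        | some j => acc ++ [(p.1, j)]
        | none => acc) acc)
      = fun acc p => acc ++
        ds.filterMap (fun d => ((fockIndexB xs).get? (fockShift p.2 d)).map (fun j => (p.1, j))) := by
    funext acc p
    refine Eq.trans (PySem.List.foldl_congr_mem ds _ _ acc ?_)
      (foldl_append_match ds (fun d => ((fockIndexB xs).get? (fockShift p.2 d)).map (fun j => (p.1, j))) acc)
    intro acc d _
    show (match (fockIndexB xs).get? (fockShift p.2 d) with
      | some j => acc ++ [(p.1, j)]
      | none => acc) = _
    cases (fockIndexB xs).get? (fockShift p.2 d) <;> simp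
  rw [hA, hB, PySem.List.foldl_append_eq_flatMap, PySem.List.foldl_append_eq_flatMap]
  simp only [List.nil_append]
  apply List.flatMap_congr
  intro p hp
  have hfilter : ((PySem.List.enumerate xs 0).filter (fun q => decide (p.1 < q.1 ∧ C p.2 q.2)))
      = (PySem.List.enumerate xs 0).filter (fun q => decide (q.2 ∈ ds.map (fockShift p.2))) := by
    apply List.filter_congr
    intro q hq
    simp only [decide_eq_decide]
    rw [enum_lt_iff xs hx p q hp hq]
    exact hC p.2 q.2
  rw [hfilter, filter_enum_eq_filterMap xs hx _ (hd p.2), List.map_filterMap,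
    List.filterMap_map]
  apply List.filterMap_congr
  intro d _
  simp only [Function.comp]
  cases (fockIndexB xs).get? (fockShift p.2 d) <;> simp


-- each rule's pair test, restricted to lexicographically larger partners, selects
-- exactly the shifted candidate list of that rule (in order)
theorem hC_fock_raise (v w : Int × Int × Int) :
    (fockLt v w ∧ (w.1 - v.1 = 1 ∧ w.2.1 - v.2.1 = 1 ∧ (w.2.2 - v.2.2).natAbs ≤ 1)) ↔
      w ∈ ([(1, 1, -1), (1, 1, 0), (1, 1, 1)] : List (Int × Int × Int)).map (fockShift v) := by
  obtain ⟨v1, v2, v3⟩ := v; obtain ⟨w1, w2, w3⟩ := w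
  simp [fockLt, fockShift, Prod.ext_iff]; omega

theorem hC_dipole (v w : Int × Int × Int) :
    (fockLt v w ∧ ((w.1 - v.1).natAbs = 1 ∧ (w.2.1 - v.2.1).natAbs = 1 ∧ (w.2.2 - v.2.2).natAbs ≤ 1)) ↔
      w ∈ ([(1, -1, -1), (1, -1, 0), (1, -1, 1), (1, 1, -1), (1, 1, 0), (1, 1, 1)] :
            List (Int × Int × Int)).map (fockShift v) := by
  obtain ⟨v1, v2, v3⟩ := v; obtain ⟨w1, w2, w3⟩ := w
  simp [fockLt, fockShift, Prod.ext_iff]; omega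

theorem hC_fock_raise_m0 (v w : Int × Int × Int) :
    (fockLt v w ∧ (w.1 - v.1 = 1 ∧ w.2.1 - v.2.1 = 1 ∧ w.2.2 - v.2.2 = 0)) ↔
      w ∈ ([(1, 1, 0)] : List (Int × Int × Int)).map (fockShift v) := by
  obtain ⟨v1, v2, v3⟩ := v; obtain ⟨w1, w2, w3⟩ := w
  simp [fockLt, fockShift, Prod.ext_iff]; omega

theorem hd_fock_raise (v : Int × Int × Int) :
    (([(1, 1, -1), (1, 1, 0), (1, 1, 1)] : List (Int × Int × Int)).map (fockShift v)).Pairwise fockLt := by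
  simp [fockShift, fockLt, List.pairwise_cons]

theorem hd_dipole (v : Int × Int × Int) :
    (([(1, -1, -1), (1, -1, 0), (1, -1, 1), (1, 1, -1), (1, 1, 0), (1, 1, 1)] :
        List (Int × Int × Int)).map (fockShift v)).Pairwise fockLt := by
  simp [fockShift, fockLt, List.pairwise_cons]

theorem hd_fock_raise_m0 (v : Int × Int × Int) :
    (([(1, 1, 0)] : List (Int × Int × Int)).map (fockShift v)).Pairwise fockLt := by
  simp

-- ===== VERDICT (by name: the statement is the Claim_ definition above) =====
theorem build_fock_graph_spec : Claim_equal_build_fock_graph := by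
  intro m er _
  unfold Spec_build_fock_graph
  simp only [build_fock_graph, build_fock_graph_alt, fockNodes_eq]
  by_cases h1 : er = "fock_raise"
  · subst h1
    simp only [beq_self_eq_true, if_true]
    rw [edges_eq_generic (fockNodesB m) (fockNodesB_pairwise m) _
      (C := fun v w => w.1 - v.1 = 1 ∧ w.2.1 - v.2.1 = 1 ∧ (w.2.2 - v.2.2).natAbs ≤ 1)
      hC_fock_raise hd_fock_raise]
    rfl
  · by_cases h2 : er = "dipole"
    · subst h2
      have e1 : (("dipole" : String) == "fock_raise") = false := by decide
      simp only [e1, Bool.false_eq_true, if_false, beq_self_eq_true, if_true]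
      rw [edges_eq_generic (fockNodesB m) (fockNodesB_pairwise m) _
        (C := fun v w => (w.1 - v.1).natAbs = 1 ∧ (w.2.1 - v.2.1).natAbs = 1 ∧ (w.2.2 - v.2.2).natAbs ≤ 1)
        hC_dipole hd_dipole]
      rfl
    · by_cases h3 : er = "fock_raise_m0"
      · subst h3
        have e1 : (("fock_raise_m0" : String) == "fock_raise") = false := by decide
        have e2 : (("fock_raise_m0" : String) == "dipole") = false := by decide
        simp only [e1, e2, Bool.false_eq_true, if_false, beq_self_eq_true, if_true]
        rw [edges_eq_generic (fockNodesB m) (fockNodesB_pairwise m) _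
          (C := fun v w => w.1 - v.1 = 1 ∧ w.2.1 - v.2.1 = 1 ∧ w.2.2 - v.2.2 = 0)
          hC_fock_raise_m0 hd_fock_raise_m0]
        rfl
      · have e1 : (er == "fock_raise") = false := by simp [h1]
        have e2 : (er == "dipole") = false := by simp [h2]
        have e3 : (er == "fock_raise_m0") = false := by simp [h3]
        simp only [fockDeltas, e1, e2, e3, Bool.false_eq_true, if_false, ite_self,
          PySem.List.foldl_ignore, List.foldl_nil]
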